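-- pv_equiv track=rewrite | github.com/nologicexe/test | speech-analyzer/functions.py | countPicks
-- ===== SOURCE A (Python) =====
-- def countPicks(a, threshold):
--     picks = 0
--     risen = False
--     if (a[0] > threshold):
--         bigger = True
--     else: bigger = False
--     for i in a:
--         if (i < threshold and bigger and risen):
--             picks+=1
--             bigger = False
--         elif (i < threshold):
--             bigger = False
--         elif (i > threshold and not bigger):
--             bigger = True
--             risen = True
--         elif (i > threshold):
--             bigger = True
--     return picks
-- ===== SOURCE B (Python) =====
-- def countPicks(a, threshold):
--     # pass 1: build the list of threshold-crossing events
--     cur = a[0] > threshold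
--     events = []
--     for x in a:
--         if x > threshold and not cur:
--             events.append('up')
--             cur = True
--         elif x < threshold and cur:
--             events.append('down')
--             cur = False
--     # pass 2: count every 'down' that occurs after the first 'up'
--     seen = False
--     count = 0
--     for e in events:
--         if e == 'up':
--             seen = True
--         elif seen:
--             count += 1
--     return count
-- ===== Notes on version B (the rewrite author's own statement) =====
-- stated objective: alternative
-- what changed: B replaces A's single-pass three-flag state machine by two passes: one pass builds an explicit list of up/down crossing events, a second scan counts each 'down' event seen after the first 'up'.
import Mathlib
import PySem

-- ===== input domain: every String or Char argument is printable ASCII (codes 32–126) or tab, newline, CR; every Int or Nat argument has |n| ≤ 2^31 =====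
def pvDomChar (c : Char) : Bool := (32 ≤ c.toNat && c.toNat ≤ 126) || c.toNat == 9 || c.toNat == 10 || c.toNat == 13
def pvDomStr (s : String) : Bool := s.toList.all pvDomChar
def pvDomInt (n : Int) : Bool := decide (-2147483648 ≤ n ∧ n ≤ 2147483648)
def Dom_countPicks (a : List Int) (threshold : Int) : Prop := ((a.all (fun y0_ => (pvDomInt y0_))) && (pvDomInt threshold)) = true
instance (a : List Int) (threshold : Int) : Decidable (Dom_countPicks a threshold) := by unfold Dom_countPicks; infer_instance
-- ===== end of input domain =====

-- B: same crossing count via an explicit event list built in one pass and counted in a second pass (alternative decomposition, not faster).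

-- ===== PORT A =====
-- loop body of A: state = (picks, bigger, risen)
def pvStepA (threshold : Int) (s : Int × Bool × Bool) (i : Int) : Int × Bool × Bool :=
  if i < threshold ∧ s.2.1 ∧ s.2.2 then (s.1 + 1, false, s.2.2)
  else if i < threshold then (s.1, false, s.2.2)
  else if i > threshold ∧ ¬ s.2.1 then (s.1, true, true)
  else if i > threshold then (s.1, true, s.2.2)
  else s

def countPicks (a : List Int) (threshold : Int) : Int :=
  match a with
  | [] => 0  -- unreachable under Pre_countPicks: Python raises IndexError on a[0]
  | h :: _ => (a.foldl (pvStepA threshold) (0, decide (h > threshold), false)).1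

-- ===== PORT B =====
-- pass 1 body: state = (events, cur); event true = 'up', false = 'down'
def pvStepB (threshold : Int) (s : List Bool × Bool) (x : Int) : List Bool × Bool :=
  if x > threshold ∧ ¬ s.2 then (s.1 ++ [true], true)
  else if x < threshold ∧ s.2 then (s.1 ++ [false], false)
  else s

-- pass 2 body: state = (count, seen)
def pvStepC (s : Int × Bool) (e : Bool) : Int × Bool :=
  if e then (s.1, true)
  else if s.2 then (s.1 + 1, s.2)
  else s

def countPicks_alt (a : List Int) (threshold : Int) : Int :=
  match a with
  | [] => 0  -- unreachable under Pre_countPicks: Python raises IndexError on a[0]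
  | h :: _ =>
    let events := (a.foldl (pvStepB threshold) ([], decide (h > threshold))).1
    (events.foldl pvStepC (0, false)).1

-- ===== PRECONDITION & SPEC =====
-- Pre_ excludes only the empty list, on which A raises IndexError at a[0] (B does too).
def Pre_countPicks (a : List Int) (threshold : Int) : Prop := a ≠ []
instance (a : List Int) (threshold : Int) : Decidable (Pre_countPicks a threshold) := by
  unfold Pre_countPicks; infer_instance
def pvWitness_countPicks : List Int × Int := ([1, 0, 2, -1], 0)

def Spec_countPicks (a : List Int) (threshold : Int) (out : Int) : Prop := out = countPicks_alt a threshold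
instance (a : List Int) (threshold : Int) (out : Int) : Decidable (Spec_countPicks a threshold out) := by unfold Spec_countPicks; infer_instance

-- ===== CLAIM (what is proved, stated in full; the proofs are below) =====
def Claim_equal_countPicks : Prop := ∀ (a : List Int) (threshold : Int), Dom_countPicks a threshold → Pre_countPicks a threshold → Spec_countPicks a threshold (countPicks a threshold)

-- ===== LEMMAS AND PROOFS =====

-- pointwise step lemmas
theorem pvA1 {t x : Int} (h : x < t) (p : Int) : pvStepA t (p, true, true) x = (p + 1, false, true) := by
  simp [pvStepA, h]
theorem pvA2 {t x : Int} (h : x < t) (p : Int) : pvStepA t (p, true, false) x = (p, false, false) := by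
  simp [pvStepA, h]
theorem pvA3 {t x : Int} (h : x < t) (p : Int) (r : Bool) : pvStepA t (p, false, r) x = (p, false, r) := by
  simp [pvStepA, h]
theorem pvA4 {t x : Int} (h : x > t) (p : Int) (r : Bool) : pvStepA t (p, false, r) x = (p, true, true) := by
  simp [pvStepA, h, not_lt.mpr h.le]
theorem pvA5 {t x : Int} (h : x > t) (p : Int) (r : Bool) : pvStepA t (p, true, r) x = (p, true, r) := by
  simp [pvStepA, h, not_lt.mpr h.le]
theorem pvA6 (t : Int) (p : Int) (b r : Bool) : pvStepA t (p, b, r) t = (p, b, r) := by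
  simp [pvStepA]
theorem pvB1 {t x : Int} (h : x > t) (evs : List Bool) : pvStepB t (evs, false) x = (evs ++ [true], true) := by
  simp [pvStepB, h]
theorem pvB2 {t x : Int} (h : x > t) (evs : List Bool) : pvStepB t (evs, true) x = (evs, true) := by
  simp [pvStepB, h, not_lt.mpr h.le]
theorem pvB3 {t x : Int} (h : x < t) (evs : List Bool) : pvStepB t (evs, true) x = (evs ++ [false], false) := by
  simp [pvStepB, h, not_lt.mpr h.le]
theorem pvB4 {t x : Int} (h : x < t) (evs : List Bool) : pvStepB t (evs, false) x = (evs, false) := by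
  simp [pvStepB, h, not_lt.mpr h.le]
theorem pvB5 (t : Int) (evs : List Bool) (c : Bool) : pvStepB t (evs, c) t = (evs, c) := by
  simp [pvStepB]
theorem pvC1 (s : Int × Bool) : pvStepC s true = (s.1, true) := by simp [pvStepC]
theorem pvC2 (c : Int) : pvStepC (c, true) false = (c + 1, true) := by simp [pvStepC]
theorem pvC3 (c : Int) : pvStepC (c, false) false = (c, false) := by simp [pvStepC]

-- pass 1 accumulates by appending: the event list factors through the empty accumulator
theorem pvStepB_append (t : Int) (l : List Int) : ∀ (evs : List Bool) (cur : Bool),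
    l.foldl (pvStepB t) (evs, cur)
      = (evs ++ (l.foldl (pvStepB t) ([], cur)).1, (l.foldl (pvStepB t) ([], cur)).2) := by
  induction l with
  | nil => intro evs cur; simp
  | cons x rest ih =>
    intro evs cur
    rcases lt_trichotomy x t with hlt | heq | hgt
    · cases cur with
      | true =>
        rw [List.foldl_cons, List.foldl_cons, pvB3 hlt, pvB3 hlt,
            ih (evs ++ [false]) false, ih ([] ++ [false]) false]
        simp
      | false => rw [List.foldl_cons, List.foldl_cons, pvB4 hlt, pvB4 hlt]; exact ih evs false
    · subst heq; rw [List.foldl_cons, List.foldl_cons, pvB5, pvB5]; exact ih evs cur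
    · cases cur with
      | true => rw [List.foldl_cons, List.foldl_cons, pvB2 hgt, pvB2 hgt]; exact ih evs true
      | false =>
        rw [List.foldl_cons, List.foldl_cons, pvB1 hgt, pvB1 hgt,
            ih (evs ++ [true]) true, ih ([] ++ [true]) true]
        simp

-- pass 2's count is the start count plus the count from zero
theorem pvStepC_acc (evs : List Bool) : ∀ (c : Int) (seen : Bool),
    (evs.foldl pvStepC (c, seen)).1 = c + (evs.foldl pvStepC (0, seen)).1 := by
  induction evs with
  | nil => intro c seen; simp
  | cons e rest ih =>
    intro c seen
    cases e with
    | true => rw [List.foldl_cons, List.foldl_cons, pvC1, pvC1]; rw [ih c true]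
    | false =>
      cases seen with
      | true =>
        rw [List.foldl_cons, List.foldl_cons, pvC2, pvC2, ih (c + 1) true, ih (0 + 1) true]
        ring
      | false => rw [List.foldl_cons, List.foldl_cons, pvC3, pvC3]; exact ih c false

-- main invariant: A's running count equals the accumulated picks plus the count of 'down'
-- events after the first 'up' (starting seen = risen) among the events of pass 1 from cur = bigger
theorem pvMain (t : Int) (l : List Int) : ∀ (picks : Int) (bigger risen : Bool),
    (l.foldl (pvStepA t) (picks, bigger, risen)).1
      = picks + (((l.foldl (pvStepB t) ([], bigger)).1).foldl pvStepC (0, risen)).1 := by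
  induction l with
  | nil => intro picks bigger risen; simp
  | cons x rest ih =>
    intro picks bigger risen
    rcases lt_trichotomy x t with hlt | heq | hgt
    · cases bigger with
      | false =>
        rw [List.foldl_cons, List.foldl_cons, pvA3 hlt, pvB4 hlt]
        exact ih picks false risen
      | true =>
        rw [List.foldl_cons, List.foldl_cons (f := pvStepB t), pvB3 hlt,
            pvStepB_append t rest ([] ++ [false]) false]
        cases risen with
        | true =>
          rw [pvA1 hlt, ih (picks + 1) false true]
          simp only [List.nil_append, List.cons_append, List.foldl_cons, List.foldl_append,
            List.foldl_nil, pvC2]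
          rw [pvStepC_acc _ (0 + 1) true]
          ring
        | false =>
          rw [pvA2 hlt, ih picks false false]
          simp only [List.nil_append, List.cons_append, List.foldl_cons, List.foldl_nil, pvC3]
    · subst heq
      rw [List.foldl_cons, List.foldl_cons, pvA6, pvB5]
      exact ih picks bigger risen
    · cases bigger with
      | true =>
        rw [List.foldl_cons, List.foldl_cons, pvA5 hgt, pvB2 hgt]
        exact ih picks true risen
      | false =>
        rw [List.foldl_cons, List.foldl_cons (f := pvStepB t), pvA4 hgt, pvB1 hgt,
            pvStepB_append t rest ([] ++ [true]) true, ih picks true true]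
        simp only [List.nil_append, List.cons_append, List.foldl_cons, List.foldl_nil, pvC1]

-- ===== VERDICT (by name: the statement is the Claim_ definition above) =====
theorem countPicks_spec : Claim_equal_countPicks := by
  intro a threshold _ hpre
  unfold Spec_countPicks
  cases a with
  | nil => exact absurd rfl hpre
  | cons h rest =>
    simp only [countPicks, countPicks_alt]
    rw [pvMain threshold (h :: rest) 0 (decide (h > threshold)) false]
    simp
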